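-- pv_equiv track=rewrite | github.com/ivanramirez-git/Talleres_Para_Mis_Fans | Mishionne Brenda/Examen 1/puntoPolivocalica.py | polivocal
-- ===== SOURCE A (Python) =====
-- def polivocal(palabra):
--     vocales = ['a','e','i','o','u']
--     vocales_encontradas = []
--     for letra in palabra:
--         if letra in vocales:
--             vocales_encontradas.append(letra)
--     if len(vocales_encontradas) == 5:
--         return True
--     else:
--         return False
-- ===== SOURCE B (Python) =====
-- def polivocal(palabra):
--     conteo = {}
--     for letra in palabra:
--         conteo[letra] = conteo.get(letra, 0) + 1
--     total = 0
--     for v in 'aeiou':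
--         total += conteo.get(v, 0)
--     return total == 5
-- ===== Notes on version B (the rewrite author's own statement) =====
-- stated objective: alternative
-- what changed: B builds a character-frequency dictionary in one pass and sums the counts of the five vowels, instead of A's filtering pass that accumulates a list of found vowels and measures its length.
import Mathlib
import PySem

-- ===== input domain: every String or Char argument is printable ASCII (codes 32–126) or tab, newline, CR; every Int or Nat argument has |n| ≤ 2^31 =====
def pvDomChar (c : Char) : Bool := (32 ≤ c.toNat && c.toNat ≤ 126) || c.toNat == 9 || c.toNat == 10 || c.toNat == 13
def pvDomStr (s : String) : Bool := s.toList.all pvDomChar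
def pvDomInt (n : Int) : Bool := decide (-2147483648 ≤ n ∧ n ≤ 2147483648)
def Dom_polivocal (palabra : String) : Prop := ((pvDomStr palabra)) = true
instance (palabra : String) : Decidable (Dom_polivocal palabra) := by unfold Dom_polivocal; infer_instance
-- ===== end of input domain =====

-- B replaces A's vowel-filtering list accumulation by a one-pass character-frequency
-- dictionary whose five vowel counts are then summed (alternative decomposition).

-- ===== PORT A =====
-- for letra in palabra: if letra in vocales: vocales_encontradas.append(letra); len == 5
def polivocal (palabra : String) : Bool :=
  let vocales : List Char := ['a', 'e', 'i', 'o', 'u']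
  let vocales_encontradas : List Char :=
    palabra.toList.foldl
      (fun acc letra => if vocales.contains letra then acc ++ [letra] else acc) []
  if vocales_encontradas.length = 5 then true else false

-- ===== PORT B =====
-- conteo[letra] = conteo.get(letra,0)+1; total += conteo.get(v,0) for v in 'aeiou'; total == 5
def polivocal_alt (palabra : String) : Bool :=
  let conteo : PySem.Dict Char Int :=
    palabra.toList.foldl (fun d letra => d.insert letra (d.getD letra 0 + 1)) PySem.Dict.empty
  let total : Int := "aeiou".toList.foldl (fun t v => t + conteo.getD v 0) 0
  total == 5

-- ===== PRECONDITION & SPEC =====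
def Spec_polivocal (palabra : String) (out : Bool) : Prop := out = polivocal_alt palabra
instance (palabra : String) (out : Bool) : Decidable (Spec_polivocal palabra out) := by unfold Spec_polivocal; infer_instance

-- ===== CLAIM (what is proved, stated in full; the proofs are below) =====
def Claim_equal_polivocal : Prop := ∀ (palabra : String), Dom_polivocal palabra → Spec_polivocal palabra (polivocal palabra)

-- ===== LEMMAS AND PROOFS =====

-- the five vowel counts sum to the number of vowel occurrences
theorem pv_sum_counts (l : List Char) :
    ((l.count 'a' : Int) + l.count 'e' + l.count 'i' + l.count 'o' + l.count 'u')
      = (l.countP (fun c => (['a','e','i','o','u'] : List Char).contains c) : Int) := by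
  induction l with
  | nil => simp
  | cons c l ih =>
    simp only [List.count_cons, List.countP_cons]
    push_cast
    split_ifs <;> simp_all <;> omega

-- ===== VERDICT (by name: the statement is the Claim_ definition above) =====
theorem polivocal_spec : Claim_equal_polivocal := by
  intro palabra _
  unfold Spec_polivocal polivocal polivocal_alt
  simp only [PySem.List.foldl_append_if, List.nil_append,
    PySem.Dict.getD_foldl_insert_add_one, PySem.Dict.getD_empty]
  rw [show ("aeiou".toList) = ['a','e','i','o','u'] from rfl]
  simp only [List.foldl_cons, List.foldl_nil, List.map_id',
    ← List.countP_eq_length_filter]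
  have h := pv_sum_counts palabra.toList
  rw [show (fun c => (['a','e','i','o','u'] : List Char).contains c)
      = (['a','e','i','o','u'] : List Char).contains from rfl] at h
  by_cases h5 :
      palabra.toList.countP (['a','e','i','o','u'] : List Char).contains = 5
  · simp only [if_pos h5]
    symm; rw [beq_iff_eq]; omega
  · simp only [if_neg h5]
    symm; rw [beq_eq_false_iff_ne]; omega
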